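-- pv_equiv track=rewrite | github.com/keita-cpa/x-power-diagnoser | apps/power-diagnoser/app/ranking.py | determine_rank_and_title
-- ===== SOURCE A (Python) =====
-- from typing import Literal
--
-- UserType = Literal["therapist", "customer"]
--
-- _THERAPIST_TITLES: list[tuple[int, str, str]] = [
--     (110, "S", "圧倒的メロいカリスマ確定演出"),
--     (96,  "S", "ギャルマインド全開の覇者"),
--     (82,  "A", "えぐちすぎてバグる成長株"),
--     (66,  "A", "キャパいのに伸びてる天才肌"),
--     (50,  "B", "風呂キャンしながら中堅維持"),
--     (36,  "C", "メンブレ寸前の頑張り屋"),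
--     (19,  "C", "しゃばいインプレゾンビ予備軍"),
--     (0,   "D", "好きすぎて滅んだ底辺案件"),
-- ]
--
-- _CUSTOMER_TITLES: list[tuple[int, str, str]] = [
--     (110, "S", "沼りすぎてキャパい最上位太客"),
--     (96,  "S", "ほんmoneyバグらせすぎの強者"),
--     (82,  "A", "蛙化現象に抗う優良常連"),
--     (66,  "A", "ギャルマインドで通い続ける勢"),
--     (50,  "B", "わかりみあるが財布がメンブレ"),
--     (36,  "C", "えぐちを感じつつも足が遠のく"),
--     (19,  "C", "しゃばい頻度でメンブレしがち"),
--     (0,   "D", "好きすぎて滅んだ幻の太客"),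
-- ]
--
-- def determine_rank_and_title(
--     total_score: int, user_type: UserType
-- ) -> tuple[Literal["S", "A", "B", "C", "D"], str]:
--     """スコアとユーザータイプからランクと称号を返す。
--
--     Returns:
--         (rank, title)
--     """
--     table = _THERAPIST_TITLES if user_type == "therapist" else _CUSTOMER_TITLES
--     for threshold, rank, title in table:
--         if total_score >= threshold:
--             return rank, title  # type: ignore[return-value]
--     return "D", table[-1][2]
-- ===== SOURCE B (Python) =====
-- from bisect import bisect_right
--
-- _THRESHOLDS = [0, 19, 36, 50, 66, 82, 96, 110]
--
-- _THERAPIST_PAIRS = [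
--     ("D", "好きすぎて滅んだ底辺案件"),
--     ("C", "しゃばいインプレゾンビ予備軍"),
--     ("C", "メンブレ寸前の頑張り屋"),
--     ("B", "風呂キャンしながら中堅維持"),
--     ("A", "キャパいのに伸びてる天才肌"),
--     ("A", "えぐちすぎてバグる成長株"),
--     ("S", "ギャルマインド全開の覇者"),
--     ("S", "圧倒的メロいカリスマ確定演出"),
-- ]
--
-- _CUSTOMER_PAIRS = [
--     ("D", "好きすぎて滅んだ幻の太客"),
--     ("C", "しゃばい頻度でメンブレしがち"),
--     ("C", "えぐちを感じつつも足が遠のく"),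
--     ("B", "わかりみあるが財布がメンブレ"),
--     ("A", "ギャルマインドで通い続ける勢"),
--     ("A", "蛙化現象に抗う優良常連"),
--     ("S", "ほんmoneyバグらせすぎの強者"),
--     ("S", "沼りすぎてキャパい最上位太客"),
-- ]
--
-- def determine_rank_and_title(total_score, user_type):
--     pairs = _THERAPIST_PAIRS if user_type == "therapist" else _CUSTOMER_PAIRS
--     i = max(bisect_right(_THRESHOLDS, total_score), 1) - 1
--     return pairs[i]
-- ===== Notes on version B (the rewrite author's own statement) =====
-- stated objective: alternative
-- what changed: Replaces A's descending linear scan over (threshold,rank,title) rows with a bisect_right binary search on an ascending threshold array indexing a parallel (rank,title) table, with the index clamped so negative scores land in the 'D' bucket.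
import Mathlib
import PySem

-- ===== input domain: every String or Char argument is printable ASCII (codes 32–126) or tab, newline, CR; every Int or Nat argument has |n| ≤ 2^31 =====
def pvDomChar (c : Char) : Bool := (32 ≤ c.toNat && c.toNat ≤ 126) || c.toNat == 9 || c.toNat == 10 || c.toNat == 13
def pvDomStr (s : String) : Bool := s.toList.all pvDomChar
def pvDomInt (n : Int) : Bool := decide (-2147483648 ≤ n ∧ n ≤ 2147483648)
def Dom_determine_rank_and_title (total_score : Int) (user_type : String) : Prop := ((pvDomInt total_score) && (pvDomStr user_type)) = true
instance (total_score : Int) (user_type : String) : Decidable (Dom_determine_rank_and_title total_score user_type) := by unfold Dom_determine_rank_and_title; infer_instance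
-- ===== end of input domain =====

-- B replaces A's descending linear scan with a bisect_right lookup over ascending thresholds (alternative decomposition).

-- ===== PORT A =====
def pvTherapistTitles : List (Int × String × String) :=
  [ (110, "S", "圧倒的メロいカリスマ確定演出"),
    (96,  "S", "ギャルマインド全開の覇者"),
    (82,  "A", "えぐちすぎてバグる成長株"),
    (66,  "A", "キャパいのに伸びてる天才肌"),
    (50,  "B", "風呂キャンしながら中堅維持"),
    (36,  "C", "メンブレ寸前の頑張り屋"),
    (19,  "C", "しゃばいインプレゾンビ予備軍"),
    (0,   "D", "好きすぎて滅んだ底辺案件") ]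

def pvCustomerTitles : List (Int × String × String) :=
  [ (110, "S", "沼りすぎてキャパい最上位太客"),
    (96,  "S", "ほんmoneyバグらせすぎの強者"),
    (82,  "A", "蛙化現象に抗う優良常連"),
    (66,  "A", "ギャルマインドで通い続ける勢"),
    (50,  "B", "わかりみあるが財布がメンブレ"),
    (36,  "C", "えぐちを感じつつも足が遠のく"),
    (19,  "C", "しゃばい頻度でメンブレしがち"),
    (0,   "D", "好きすぎて滅んだ幻の太客") ]

-- the for-loop with early return: first row whose threshold ≤ score; fall-through returns ("D", last title)
def pvScanRows (total_score : Int) (fallback : String × String) : List (Int × String × String) → String × String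
  | [] => fallback
  | (threshold, rank, title) :: rest =>
      if total_score ≥ threshold then (rank, title) else pvScanRows total_score fallback rest

def determine_rank_and_title (total_score : Int) (user_type : String) : String × String :=
  let table := if user_type == "therapist" then pvTherapistTitles else pvCustomerTitles
  pvScanRows total_score ("D", ((table.getLastD (0, "D", "")).2.2)) table

-- ===== PORT B =====
def pvThresholds : List Int := [0, 19, 36, 50, 66, 82, 96, 110]

def pvTherapistPairs : List (String × String) :=
  [ ("D", "好きすぎて滅んだ底辺案件"),
    ("C", "しゃばいインプレゾンビ予備軍"),
    ("C", "メンブレ寸前の頑張り屋"),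
    ("B", "風呂キャンしながら中堅維持"),
    ("A", "キャパいのに伸びてる天才肌"),
    ("A", "えぐちすぎてバグる成長株"),
    ("S", "ギャルマインド全開の覇者"),
    ("S", "圧倒的メロいカリスマ確定演出") ]

def pvCustomerPairs : List (String × String) :=
  [ ("D", "好きすぎて滅んだ幻の太客"),
    ("C", "しゃばい頻度でメンブレしがち"),
    ("C", "えぐちを感じつつも足が遠のく"),
    ("B", "わかりみあるが財布がメンブレ"),
    ("A", "ギャルマインドで通い続ける勢"),
    ("A", "蛙化現象に抗う優良常連"),
    ("S", "ほんmoneyバグらせすぎの強者"),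
    ("S", "沼りすぎてキャパい最上位太客") ]

-- bisect.bisect_right on a sorted list = number of elements ≤ x (stdlib call, ported by its contract)
def pvBisectRight (xs : List Int) (x : Int) : Nat := (xs.filter (fun t => t ≤ x)).length

def determine_rank_and_title_alt (total_score : Int) (user_type : String) : String × String :=
  let pairs := if user_type == "therapist" then pvTherapistPairs else pvCustomerPairs
  let i := (max (pvBisectRight pvThresholds total_score) 1) - 1
  pairs.getD i ("D", "")

-- ===== PRECONDITION & SPEC =====
def Spec_determine_rank_and_title (total_score : Int) (user_type : String) (out : String × String) : Prop := out = determine_rank_and_title_alt total_score user_type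
instance (total_score : Int) (user_type : String) (out : String × String) : Decidable (Spec_determine_rank_and_title total_score user_type out) := by unfold Spec_determine_rank_and_title; infer_instance

-- ===== CLAIM (what is proved, stated in full; the proofs are below) =====
def Claim_equal_determine_rank_and_title : Prop := ∀ (total_score : Int) (user_type : String), Dom_determine_rank_and_title total_score user_type → Spec_determine_rank_and_title total_score user_type (determine_rank_and_title total_score user_type)

-- ===== LEMMAS AND PROOFS =====

theorem pv_therapist_eq (ts : Int) : pvScanRows ts ("D", "好きすぎて滅んだ底辺案件") pvTherapistTitles = pvTherapistPairs.getD ((max (pvBisectRight pvThresholds ts) 1) - 1) ("D", "") := by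
  by_cases h7 : (110:Int) ≤ ts
  · simp [pvScanRows, pvTherapistTitles, pvBisectRight, pvThresholds, pvTherapistPairs, ge_iff_le, h7, show (0:Int) ≤ ts by omega, show (19:Int) ≤ ts by omega, show (36:Int) ≤ ts by omega, show (50:Int) ≤ ts by omega, show (66:Int) ≤ ts by omega, show (82:Int) ≤ ts by omega, show (96:Int) ≤ ts by omega]
  by_cases h6 : (96:Int) ≤ ts
  · simp [pvScanRows, pvTherapistTitles, pvBisectRight, pvThresholds, pvTherapistPairs, ge_iff_le, h6, show (0:Int) ≤ ts by omega, show (19:Int) ≤ ts by omega, show (36:Int) ≤ ts by omega, show (50:Int) ≤ ts by omega, show (66:Int) ≤ ts by omega, show (82:Int) ≤ ts by omega, h7]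
  by_cases h5 : (82:Int) ≤ ts
  · simp [pvScanRows, pvTherapistTitles, pvBisectRight, pvThresholds, pvTherapistPairs, ge_iff_le, h5, show (0:Int) ≤ ts by omega, show (19:Int) ≤ ts by omega, show (36:Int) ≤ ts by omega, show (50:Int) ≤ ts by omega, show (66:Int) ≤ ts by omega, h7, h6]
  by_cases h4 : (66:Int) ≤ ts
  · simp [pvScanRows, pvTherapistTitles, pvBisectRight, pvThresholds, pvTherapistPairs, ge_iff_le, h4, show (0:Int) ≤ ts by omega, show (19:Int) ≤ ts by omega, show (36:Int) ≤ ts by omega, show (50:Int) ≤ ts by omega, h7, h6, h5]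
  by_cases h3 : (50:Int) ≤ ts
  · simp [pvScanRows, pvTherapistTitles, pvBisectRight, pvThresholds, pvTherapistPairs, ge_iff_le, h3, show (0:Int) ≤ ts by omega, show (19:Int) ≤ ts by omega, show (36:Int) ≤ ts by omega, h7, h6, h5, h4]
  by_cases h2 : (36:Int) ≤ ts
  · simp [pvScanRows, pvTherapistTitles, pvBisectRight, pvThresholds, pvTherapistPairs, ge_iff_le, h2, show (0:Int) ≤ ts by omega, show (19:Int) ≤ ts by omega, h7, h6, h5, h4, h3]
  by_cases h1 : (19:Int) ≤ ts
  · simp [pvScanRows, pvTherapistTitles, pvBisectRight, pvThresholds, pvTherapistPairs, ge_iff_le, h1, show (0:Int) ≤ ts by omega, h7, h6, h5, h4, h3, h2]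
  by_cases h0 : (0:Int) ≤ ts
  · simp [pvScanRows, pvTherapistTitles, pvBisectRight, pvThresholds, pvTherapistPairs, ge_iff_le, h0, h7, h6, h5, h4, h3, h2, h1]
  · simp [pvScanRows, pvTherapistTitles, pvBisectRight, pvThresholds, pvTherapistPairs, ge_iff_le, h7, h6, h5, h4, h3, h2, h1, h0]

theorem pv_customer_eq (ts : Int) : pvScanRows ts ("D", "好きすぎて滅んだ幻の太客") pvCustomerTitles = pvCustomerPairs.getD ((max (pvBisectRight pvThresholds ts) 1) - 1) ("D", "") := by
  by_cases h7 : (110:Int) ≤ ts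
  · simp [pvScanRows, pvCustomerTitles, pvBisectRight, pvThresholds, pvCustomerPairs, ge_iff_le, h7, show (0:Int) ≤ ts by omega, show (19:Int) ≤ ts by omega, show (36:Int) ≤ ts by omega, show (50:Int) ≤ ts by omega, show (66:Int) ≤ ts by omega, show (82:Int) ≤ ts by omega, show (96:Int) ≤ ts by omega]
  by_cases h6 : (96:Int) ≤ ts
  · simp [pvScanRows, pvCustomerTitles, pvBisectRight, pvThresholds, pvCustomerPairs, ge_iff_le, h6, show (0:Int) ≤ ts by omega, show (19:Int) ≤ ts by omega, show (36:Int) ≤ ts by omega, show (50:Int) ≤ ts by omega, show (66:Int) ≤ ts by omega, show (82:Int) ≤ ts by omega, h7]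
  by_cases h5 : (82:Int) ≤ ts
  · simp [pvScanRows, pvCustomerTitles, pvBisectRight, pvThresholds, pvCustomerPairs, ge_iff_le, h5, show (0:Int) ≤ ts by omega, show (19:Int) ≤ ts by omega, show (36:Int) ≤ ts by omega, show (50:Int) ≤ ts by omega, show (66:Int) ≤ ts by omega, h7, h6]
  by_cases h4 : (66:Int) ≤ ts
  · simp [pvScanRows, pvCustomerTitles, pvBisectRight, pvThresholds, pvCustomerPairs, ge_iff_le, h4, show (0:Int) ≤ ts by omega, show (19:Int) ≤ ts by omega, show (36:Int) ≤ ts by omega, show (50:Int) ≤ ts by omega, h7, h6, h5]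
  by_cases h3 : (50:Int) ≤ ts
  · simp [pvScanRows, pvCustomerTitles, pvBisectRight, pvThresholds, pvCustomerPairs, ge_iff_le, h3, show (0:Int) ≤ ts by omega, show (19:Int) ≤ ts by omega, show (36:Int) ≤ ts by omega, h7, h6, h5, h4]
  by_cases h2 : (36:Int) ≤ ts
  · simp [pvScanRows, pvCustomerTitles, pvBisectRight, pvThresholds, pvCustomerPairs, ge_iff_le, h2, show (0:Int) ≤ ts by omega, show (19:Int) ≤ ts by omega, h7, h6, h5, h4, h3]
  by_cases h1 : (19:Int) ≤ ts
  · simp [pvScanRows, pvCustomerTitles, pvBisectRight, pvThresholds, pvCustomerPairs, ge_iff_le, h1, show (0:Int) ≤ ts by omega, h7, h6, h5, h4, h3, h2]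
  by_cases h0 : (0:Int) ≤ ts
  · simp [pvScanRows, pvCustomerTitles, pvBisectRight, pvThresholds, pvCustomerPairs, ge_iff_le, h0, h7, h6, h5, h4, h3, h2, h1]
  · simp [pvScanRows, pvCustomerTitles, pvBisectRight, pvThresholds, pvCustomerPairs, ge_iff_le, h7, h6, h5, h4, h3, h2, h1, h0]


-- ===== VERDICT (by name: the statement is the Claim_ definition above) =====
theorem determine_rank_and_title_spec : Claim_equal_determine_rank_and_title := by
  intro ts ut _
  unfold Spec_determine_rank_and_title determine_rank_and_title determine_rank_and_title_alt
  by_cases hu : ut == "therapist"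
  · simpa [hu, pvTherapistTitles] using pv_therapist_eq ts
  · simpa [hu, pvCustomerTitles] using pv_customer_eq ts
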